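-- pv_equiv track=rewrite | github.com/zse7/omgtu | olimp/razvedka.py | f
-- ===== SOURCE A (Python) =====
-- from collections import defaultdict
--
-- def f(x):
--     if x < 3:
--         return 0
--     if x == 3:
--         return 1
--     cash = defaultdict(int)
--     if cash[x] == 0:
--         cash[x] = f(x // 2) + f(x - x // 2)
--         return cash[x]
-- ===== SOURCE B (Python) =====
-- def f(x):
--     if x < 3:
--         return 0
--     if x == 3:
--         return 1
--
--     def pair(n):
--         # returns (f(n), f(n+1)) for n >= 2; O(log n) single-chain descent
--         if n <= 2:
--             return (0, 1)
--         if n == 3: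
--             return (1, 0)
--         a, b = pair(n // 2)
--         if n % 2 == 0:
--             return (a + a, a + b)
--         else:
--             return (a + b, b + b)
--
--     return pair(x)[0]
-- ===== Notes on version B (the rewrite author's own statement) =====
-- stated objective: faster
-- what changed: B replaces A's exponential-tree recursion f(x//2)+f(x-x//2) (its per-call defaultdict caches nothing) by a single-chain descent computing the pair of f at two consecutive arguments from the pair at the floor half, so only O(log x) calls are made.
import Mathlib
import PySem

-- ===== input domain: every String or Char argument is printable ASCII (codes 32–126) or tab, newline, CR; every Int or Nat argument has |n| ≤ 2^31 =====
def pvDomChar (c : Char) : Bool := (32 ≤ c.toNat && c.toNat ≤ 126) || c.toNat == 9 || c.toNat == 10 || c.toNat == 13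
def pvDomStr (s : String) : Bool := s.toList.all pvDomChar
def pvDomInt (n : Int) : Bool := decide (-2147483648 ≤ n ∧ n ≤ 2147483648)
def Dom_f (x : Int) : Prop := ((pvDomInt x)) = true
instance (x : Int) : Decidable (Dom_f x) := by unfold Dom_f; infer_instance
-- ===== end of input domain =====

-- B replaces A's exponential-tree recursion by a single O(log x) descent computing the pair (f n, f n+1); asymptotically faster.

-- ===== PORT A =====
-- A's defaultdict 'cash' is fresh in every call, so cash[x] == 0 always holds and
-- the branch always returns f(x//2) + f(x - x//2); ported literally as that recursion.
def f (x : Int) : Int :=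
  if x < 3 then 0
  else if x = 3 then 1
  else f (PySem.Int.floordiv x 2) + f (x - PySem.Int.floordiv x 2)
termination_by x.toNat
decreasing_by
  all_goals
    simp only [PySem.Int.floordiv_eq_ediv_of_pos (by omega : (0:Int) < 2)]
    omega

-- ===== PORT B =====
-- pair n = (f n, f (n+1)), computed by one recursive call on the floor half of n
def fAltPair (n : Int) : Int × Int :=
  if n ≤ 2 then (0, 1)
  else if n = 3 then (1, 0)
  else
    let p := fAltPair (PySem.Int.floordiv n 2)
    if PySem.Int.mod n 2 = 0 then (p.1 + p.1, p.1 + p.2)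
    else (p.1 + p.2, p.2 + p.2)
termination_by n.toNat
decreasing_by
  simp only [PySem.Int.floordiv_eq_ediv_of_pos (by omega : (0:Int) < 2)]
  omega

def f_alt (x : Int) : Int :=
  if x < 3 then 0
  else if x = 3 then 1
  else (fAltPair x).1

-- ===== PRECONDITION & SPEC =====
def Spec_f (x : Int) (out : Int) : Prop := out = f_alt x
instance (x : Int) (out : Int) : Decidable (Spec_f x out) := by unfold Spec_f; infer_instance

-- ===== CLAIM (what is proved, stated in full; the proofs are below) =====
def Claim_equal_f : Prop := ∀ (x : Int), Dom_f x → Spec_f x (f x)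

-- ===== LEMMAS AND PROOFS =====

theorem pair_spec (n : Int) (h2 : 2 ≤ n) : fAltPair n = (f n, f (n + 1)) := by
  have hf2 : f 2 = 0 := by rw [f]; norm_num
  have hf3 : f 3 = 1 := by rw [f]; norm_num
  have hf4 : f 4 = 0 := by
    rw [f]
    norm_num [PySem.Int.floordiv_eq_ediv_of_pos (by omega : (0:Int) < 2), hf2]
  by_cases hle : n ≤ 2
  · have hn : n = 2 := le_antisymm hle h2
    subst hn
    rw [fAltPair]
    norm_num [hf2, hf3]
  · by_cases h3 : n = 3
    · subst h3
      rw [fAltPair]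
      norm_num [hf3, hf4]
    · -- n ≥ 4
      have h4 : 4 ≤ n := by omega
      have hfd : PySem.Int.floordiv n 2 = n / 2 :=
        PySem.Int.floordiv_eq_ediv_of_pos (by omega)
      have hfd1 : PySem.Int.floordiv (n + 1) 2 = (n + 1) / 2 :=
        PySem.Int.floordiv_eq_ediv_of_pos (by omega)
      have hmod : PySem.Int.mod n 2 = n % 2 :=
        PySem.Int.mod_eq_emod_of_pos (by omega)
      have ih := pair_spec (n / 2) (by omega)
      rw [fAltPair]
      simp only [hfd, hmod, ih, if_neg hle, if_neg h3]
      have hfn : f n = f (n / 2) + f (n - n / 2) := by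
        rw [f]
        simp only [hfd, if_neg (by omega : ¬ n < 3), if_neg h3]
      have hfn1 : f (n + 1) = f ((n + 1) / 2) + f (n + 1 - (n + 1) / 2) := by
        rw [f]
        simp only [hfd1, if_neg (by omega : ¬ n + 1 < 3), if_neg (by omega : ¬ n + 1 = 3)]
      by_cases hpar : n % 2 = 0
      · have e1 : n - n / 2 = n / 2 := by omega
        have e2 : (n + 1) / 2 = n / 2 := by omega
        have e3 : n + 1 - n / 2 = n / 2 + 1 := by omega
        simp only [if_pos hpar, hfn, hfn1, e1, e2, e3]
      · have e1 : n - n / 2 = n / 2 + 1 := by omega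
        have e2 : (n + 1) / 2 = n / 2 + 1 := by omega
        have e3 : n + 1 - (n / 2 + 1) = n / 2 + 1 := by omega
        simp only [if_neg hpar, hfn, hfn1, e1, e2, e3]
termination_by n.toNat
decreasing_by omega

-- ===== VERDICT (by name: the statement is the Claim_ definition above) =====
theorem f_spec : Claim_equal_f := by
  intro x _
  unfold Spec_f f_alt
  by_cases h1 : x < 3
  · rw [f, if_pos h1, if_pos h1]
  · by_cases h2 : x = 3
    · subst h2; rw [f]; norm_num
    · rw [if_neg h1, if_neg h2, pair_spec x (by omega)]
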